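-- pv_equiv track=rewrite | github.com/ezraravin/ANPR | main.py | map_rule
-- ===== SOURCE A (Python) =====
-- def map_rule(text):
--     char_list = []
--     for i in range(len(text)):
--         if i == 0:
--             if text[i] != '-':
--                 char_list.append(text[i])
--         else:
--             if text[i] != '-' and (not (text[i] == text[i - 1])):
--                 char_list.append(text[i])
--     return ''.join(char_list)
-- ===== SOURCE B (Python) =====
-- def map_rule(text):
--     # Stage 1: run-length encode the string (one (char, length) pair per
--     # maximal run of equal characters), jumping pointer i to the run end.
--     runs = []
--     i, n = 0, len(text)
--     while i < n:
--         j = i + 1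
--         while j < n and text[j] == text[i]:
--             j += 1
--         runs.append((text[i], j - i))
--         i = j
--     # Stage 2: one representative per run, dropping '-' runs.
--     return ''.join(c for c, _ in runs if c != '-')
-- ===== Notes on version B (the rewrite author's own statement) =====
-- stated objective: alternative
-- what changed: Replaces the single-pass previous-character comparison by a two-stage algorithm: first build an explicit run-length encoding with a run-skipping two-pointer scan, then emit one representative per run while filtering out '-' runs.
import Mathlib
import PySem

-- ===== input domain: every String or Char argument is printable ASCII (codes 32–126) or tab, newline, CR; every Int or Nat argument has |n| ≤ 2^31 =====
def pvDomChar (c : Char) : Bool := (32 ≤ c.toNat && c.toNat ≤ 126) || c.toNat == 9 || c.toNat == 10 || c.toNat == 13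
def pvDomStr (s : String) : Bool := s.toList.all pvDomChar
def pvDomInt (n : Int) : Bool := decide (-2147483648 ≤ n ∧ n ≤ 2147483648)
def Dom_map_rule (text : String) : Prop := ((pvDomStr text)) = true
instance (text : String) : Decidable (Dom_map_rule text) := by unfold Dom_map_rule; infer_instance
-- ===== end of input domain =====

-- B first builds an explicit run-length encoding with a run-skipping scan, then emits one
-- representative per run while dropping '-' runs; alternative two-stage algorithm, same result.

-- ===== PORT A =====
-- literal transliteration of A's index loop; pyGetD's default is never used (all indices are in range)
def map_rule (text : String) : String :=
  String.mk ((PySem.List.pyRange 0 (text.toList.length : Int) 1).foldl (fun acc i =>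
    if i = 0 then
      (if PySem.List.pyGetD text.toList i ' ' ≠ '-' then acc ++ [PySem.List.pyGetD text.toList i ' '] else acc)
    else
      (if PySem.List.pyGetD text.toList i ' ' ≠ '-' ∧ ¬ (PySem.List.pyGetD text.toList i ' ' = PySem.List.pyGetD text.toList (i-1) ' ')
        then acc ++ [PySem.List.pyGetD text.toList i ' '] else acc)) [])

-- ===== PORT B =====
-- stage 1 of Source B: the inner `while text[j] == text[i]` pointer jump is the takeWhile/dropWhile
-- split of the remaining suffix; each step emits one (char, run-length) pair
def pvRleRuns : List Char → List (Char × Nat)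
  | [] => []
  | c :: rest =>
    (c, 1 + (rest.takeWhile (fun x => x = c)).length) :: pvRleRuns (rest.dropWhile (fun x => x = c))
termination_by cs => cs.length
decreasing_by
  have := List.length_dropWhile_le (fun x => x = c) rest
  simp; omega

-- stage 2 of Source B: one representative per run, dropping '-' runs
def map_rule_alt (text : String) : String :=
  String.mk (((pvRleRuns text.toList).filter (fun p => p.1 ≠ '-')).map Prod.fst)

-- ===== PRECONDITION & SPEC =====
def Spec_map_rule (text : String) (out : String) : Prop := out = map_rule_alt text
instance (text : String) (out : String) : Decidable (Spec_map_rule text out) := by unfold Spec_map_rule; infer_instance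

-- ===== CLAIM (what is proved, stated in full; the proofs are below) =====
def Claim_equal_map_rule : Prop := ∀ (text : String), Dom_map_rule text → Spec_map_rule text (map_rule text)

-- ===== LEMMAS AND PROOFS =====

-- proof helper: left-to-right pass carrying the previous character (characterises A's loop)
def pvGo : Option Char → List Char → List Char
  | _, [] => []
  | prev, c :: rest => (if c ≠ '-' ∧ prev ≠ some c then [c] else []) ++ pvGo (some c) rest

lemma pvGo_some (rest : List Char) : ∀ p : Char,
    (List.destutter' (· ≠ ·) p rest).filter (· ≠ '-')
      = (if p = '-' then [] else [p]) ++ pvGo (some p) rest := by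
  induction rest with
  | nil =>
    intro p
    by_cases hp : p = '-' <;> simp [List.destutter', pvGo, hp]
  | cons c rest ih =>
    intro p
    by_cases hpc : p = c
    · subst hpc
      have hd : List.destutter' (· ≠ ·) p (p :: rest) = List.destutter' (· ≠ ·) p rest := by
        simp [List.destutter']
      rw [hd, ih p]
      simp [pvGo]
    · have hd : List.destutter' (· ≠ ·) p (c :: rest) = p :: List.destutter' (· ≠ ·) c rest := by
        simp [List.destutter', hpc]
      rw [hd, List.filter_cons, ih c]
      by_cases hp : p = '-' <;> by_cases hc : c = '-' <;>
        simp [pvGo, hp, hc, hpc, eq_comm, (show ¬c = p from fun h => hpc h.symm)]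

lemma pvGo_none (cs : List Char) :
    pvGo none cs = (cs.destutter (· ≠ ·)).filter (· ≠ '-') := by
  cases cs with
  | nil => simp [pvGo, List.destutter]
  | cons c rest =>
    rw [List.destutter_cons', pvGo_some rest c]
    by_cases hc : c = '-' <;> simp [pvGo, hc]

-- A's fold over pyRange computes pvGo
lemma pvFold_eq (cs cur : List Char) : ∀ (pre acc : List Char), cs = pre ++ cur →
    (PySem.List.pyRange (pre.length : Int) (cs.length : Int) 1).foldl (fun acc i =>
      if i = 0 then
        (if PySem.List.pyGetD cs i ' ' ≠ '-' then acc ++ [PySem.List.pyGetD cs i ' '] else acc)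
      else
        (if PySem.List.pyGetD cs i ' ' ≠ '-' ∧ ¬ (PySem.List.pyGetD cs i ' ' = PySem.List.pyGetD cs (i-1) ' ')
          then acc ++ [PySem.List.pyGetD cs i ' '] else acc)) acc
    = acc ++ pvGo pre.getLast? cur := by
  induction cur with
  | nil =>
    intro pre acc h
    subst h
    rw [PySem.List.pyRange_one_eq_nil (by simp)]
    simp [pvGo]
  | cons c rest ih =>
    intro pre acc h
    subst h
    have hlt : (pre.length : Int) < ((pre ++ c :: rest).length : Int) := by
      simp
    rw [PySem.List.pyRange_one_cons hlt]
    simp only [List.foldl_cons]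
    have hget : PySem.List.pyGetD (pre ++ c :: rest) ((pre.length : Nat) : Int) ' ' = c := by
      rw [PySem.List.pyGetD_natCast]; simp
    have hstep : (if (pre.length : Int) = 0 then
        (if PySem.List.pyGetD (pre ++ c :: rest) (pre.length : Int) ' ' ≠ '-' then
          acc ++ [PySem.List.pyGetD (pre ++ c :: rest) (pre.length : Int) ' '] else acc)
      else
        (if PySem.List.pyGetD (pre ++ c :: rest) (pre.length : Int) ' ' ≠ '-' ∧
            ¬ (PySem.List.pyGetD (pre ++ c :: rest) (pre.length : Int) ' '
              = PySem.List.pyGetD (pre ++ c :: rest) ((pre.length : Int)-1) ' ')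
          then acc ++ [PySem.List.pyGetD (pre ++ c :: rest) (pre.length : Int) ' '] else acc))
      = acc ++ (if c ≠ '-' ∧ pre.getLast? ≠ some c then [c] else []) := by
      rcases List.eq_nil_or_concat pre with hnil | ⟨pre', p, rfl⟩
      · subst hnil
        simp only [List.length_nil, Nat.cast_zero, List.nil_append, List.getLast?_nil] at hget ⊢
        simp only [if_true, hget]
        by_cases hc : c = '-' <;> simp [hc]
      · simp only [List.concat_eq_append] at *
        have hlen : ((pre' ++ [p]).length : Int) ≠ 0 := by
          have : 0 < (pre' ++ [p]).length := by simp
          omega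
        have hidx : (((pre' ++ [p]).length : Int) - 1) = ((pre'.length : Nat) : Int) := by simp
        have hprev : PySem.List.pyGetD (pre' ++ [p] ++ c :: rest) (((pre' ++ [p]).length : Int) - 1) ' ' = p := by
          rw [hidx, PySem.List.pyGetD_natCast]
          simp [List.append_assoc]
        rw [if_neg hlen, hget, hprev]
        have hlast : (pre' ++ [p]).getLast? = some p := by simp
        rw [hlast]
        by_cases hc : c = '-'
        · simp [hc]
        · by_cases hpc : p = c
          · simp [hc, hpc]
          · simp [hc, hpc, Ne.symm hpc]
    rw [hstep]
    have hlen2 : ((pre.length : Int) + 1) = (((pre ++ [c]).length : Nat) : Int) := by simp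
    rw [hlen2, ih (pre ++ [c]) _ (by simp)]
    have hlast2 : (pre ++ [c]).getLast? = some c := by simp
    rw [hlast2]
    simp [pvGo]

-- destutter' past a run of equal characters
lemma pvDestutter'_dropWhile (rest : List Char) : ∀ c : Char,
    List.destutter' (· ≠ ·) c rest = c :: (rest.dropWhile (fun x => x = c)).destutter (· ≠ ·) := by
  induction rest with
  | nil => intro c; simp [List.destutter', List.destutter]
  | cons d t ih =>
    intro c
    by_cases hdc : d = c
    · subst hdc
      have : List.destutter' (· ≠ ·) d (d :: t) = List.destutter' (· ≠ ·) d t := by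
        simp [List.destutter']
      rw [this, ih d]
      simp [List.dropWhile]
    · have hcd : ¬ c = d := fun h => hdc h.symm
      have : List.destutter' (· ≠ ·) c (d :: t) = c :: List.destutter' (· ≠ ·) d t := by
        simp [List.destutter', hcd]
      rw [this, List.dropWhile_cons_of_neg (by simpa using hdc), List.destutter_cons']

-- the run keys are exactly the destuttered string
lemma pvRleRuns_keys (cs : List Char) :
    (pvRleRuns cs).map Prod.fst = cs.destutter (· ≠ ·) := by
  induction cs using pvRleRuns.induct with
  | case1 => simp [pvRleRuns, List.destutter]
  | case2 c rest ih =>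
    rw [pvRleRuns]
    simp only [List.map_cons, ih, List.destutter_cons', pvDestutter'_dropWhile]

-- filter before projecting = project then filter
lemma pvFilterMapFst (l : List (Char × Nat)) :
    (l.filter (fun p => p.1 ≠ '-')).map Prod.fst = (l.map Prod.fst).filter (· ≠ '-') := by
  induction l with
  | nil => simp
  | cons p t ih =>
    by_cases hp : p.1 = '-' <;> simp [List.filter_cons, hp] <;> simpa using ih

-- ===== VERDICT (by name: the statement is the Claim_ definition above) =====
theorem map_rule_spec : Claim_equal_map_rule := by
  intro text _
  show map_rule text = map_rule_alt text
  unfold map_rule map_rule_alt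
  have h := pvFold_eq text.toList text.toList [] [] (by simp)
  simp only [List.length_nil, Nat.cast_zero] at h
  rw [h, pvFilterMapFst, pvRleRuns_keys]
  simp [pvGo_none]
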